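-- pv_equiv track=rewrite | github.com/harrisonju123/nbamodels | archive/consolidation_backup_20260109/scripts_backup/analyze_feature_importance.py | categorize_features
-- ===== SOURCE A (Python) =====
-- def categorize_features(feature_names):
--     """Categorize features by type."""
--     categories = {
--         'Team Stats (Rolling)': [],
--         'Team Context': [],
--         'Differentials': [],
--         'Lineup/Injury': [],
--         'Matchup (H2H)': [],
--         'Elo': [],
--         'Referee': [],
--         'News': [],
--         'Sentiment': [],
--         'Schedule': [],
--         'Odds': [],
--         'Season': [],
--     }
--
--     for feat in feature_names:
--         if 'ref_' in feat:
--             categories['Referee'].append(feat)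
--         elif 'news_' in feat:
--             categories['News'].append(feat)
--         elif 'sentiment' in feat:
--             categories['Sentiment'].append(feat)
--         elif 'lineup' in feat or 'injury' in feat or 'injured' in feat or 'missing' in feat or 'impact' in feat:
--             categories['Lineup/Injury'].append(feat)
--         elif 'elo' in feat:
--             categories['Elo'].append(feat)
--         elif feat.startswith('diff_'):
--             categories['Differentials'].append(feat)
--         elif 'h2h_' in feat or 'division' in feat or 'conference' in feat or 'rivalry' in feat:
--             categories['Matchup (H2H)'].append(feat)
--         elif 'b2b' in feat or 'rest' in feat:
--             categories['Schedule'].append(feat)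
--         elif feat in ['spread_home', 'total']:
--             categories['Odds'].append(feat)
--         elif 'season' in feat or 'allstar' in feat:
--             categories['Season'].append(feat)
--         elif 'travel' in feat or 'home_season_win_pct' in feat or 'away_season_win_pct' in feat:
--             categories['Team Context'].append(feat)
--         else:
--             categories['Team Stats (Rolling)'].append(feat)
--
--     return categories
-- ===== SOURCE B (Python) =====
-- CATEGORY_NAMES = [
--     'Team Stats (Rolling)', 'Team Context', 'Differentials', 'Lineup/Injury',
--     'Matchup (H2H)', 'Elo', 'Referee', 'News', 'Sentiment', 'Schedule',
--     'Odds', 'Season',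
-- ]
--
--
-- def _classify(feat):
--     """First-match category of a single feature name (same priority order as the spec)."""
--     if 'ref_' in feat:
--         return 'Referee'
--     if 'news_' in feat:
--         return 'News'
--     if 'sentiment' in feat:
--         return 'Sentiment'
--     if 'lineup' in feat or 'injury' in feat or 'injured' in feat or 'missing' in feat or 'impact' in feat:
--         return 'Lineup/Injury'
--     if 'elo' in feat:
--         return 'Elo'
--     if feat.startswith('diff_'):
--         return 'Differentials'
--     if 'h2h_' in feat or 'division' in feat or 'conference' in feat or 'rivalry' in feat:
--         return 'Matchup (H2H)'
--     if 'b2b' in feat or 'rest' in feat: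
--         return 'Schedule'
--     if feat in ['spread_home', 'total']:
--         return 'Odds'
--     if 'season' in feat or 'allstar' in feat:
--         return 'Season'
--     if 'travel' in feat or 'home_season_win_pct' in feat or 'away_season_win_pct' in feat:
--         return 'Team Context'
--     return 'Team Stats (Rolling)'
--
--
-- def categorize_features(feature_names):
--     """Categorize features by type: group-by via one per-category filter pass."""
--     return {cat: [f for f in feature_names if _classify(f) == cat]
--             for cat in CATEGORY_NAMES}
-- ===== Notes on version B (the rewrite author's own statement) =====
-- stated objective: alternative
-- what changed: A makes one pass, pushing each feature through an elif chain that appends into a pre-built dict of buckets; B factors the chain into a pure first-match classifier and builds the result as a group-by, one filter pass over the input per category (trades a constant factor of ~12 passes for a side-effect-free decomposition).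
import Mathlib
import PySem

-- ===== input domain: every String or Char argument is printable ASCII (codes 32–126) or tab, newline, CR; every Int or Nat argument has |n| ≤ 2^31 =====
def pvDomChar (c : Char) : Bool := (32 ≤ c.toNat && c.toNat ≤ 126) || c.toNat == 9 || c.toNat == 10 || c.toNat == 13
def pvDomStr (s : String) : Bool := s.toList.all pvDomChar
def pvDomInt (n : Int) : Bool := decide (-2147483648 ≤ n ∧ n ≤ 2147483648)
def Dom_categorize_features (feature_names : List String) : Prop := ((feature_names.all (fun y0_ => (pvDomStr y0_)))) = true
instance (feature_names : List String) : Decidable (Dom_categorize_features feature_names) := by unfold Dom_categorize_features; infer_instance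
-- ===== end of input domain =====

-- B replaces A's single pass with branchy dict appends by a first-match classifier and one
-- per-category filter pass per category (a group-by); objective: alternative decomposition, same cost class.

-- ===== PORT A =====
-- the literal dict A initialises
def pvInitCats : PySem.Dict String (List String) := PySem.Dict.ofList
  [("Team Stats (Rolling)", []), ("Team Context", []), ("Differentials", []),
   ("Lineup/Injury", []), ("Matchup (H2H)", []), ("Elo", []), ("Referee", []),
   ("News", []), ("Sentiment", []), ("Schedule", []), ("Odds", []), ("Season", [])]

-- the body of A's for-loop (the elif chain, branch for branch)
def pvStep (d : PySem.Dict String (List String)) (feat : String) : PySem.Dict String (List String) :=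
  if PySem.Str.isIn "ref_" feat then d.modify "Referee" [] (· ++ [feat])
  else if PySem.Str.isIn "news_" feat then d.modify "News" [] (· ++ [feat])
  else if PySem.Str.isIn "sentiment" feat then d.modify "Sentiment" [] (· ++ [feat])
  else if PySem.Str.isIn "lineup" feat || PySem.Str.isIn "injury" feat || PySem.Str.isIn "injured" feat
        || PySem.Str.isIn "missing" feat || PySem.Str.isIn "impact" feat then d.modify "Lineup/Injury" [] (· ++ [feat])
  else if PySem.Str.isIn "elo" feat then d.modify "Elo" [] (· ++ [feat])
  else if PySem.Str.startswith feat "diff_" then d.modify "Differentials" [] (· ++ [feat])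
  else if PySem.Str.isIn "h2h_" feat || PySem.Str.isIn "division" feat || PySem.Str.isIn "conference" feat
        || PySem.Str.isIn "rivalry" feat then d.modify "Matchup (H2H)" [] (· ++ [feat])
  else if PySem.Str.isIn "b2b" feat || PySem.Str.isIn "rest" feat then d.modify "Schedule" [] (· ++ [feat])
  else if feat ∈ (["spread_home", "total"] : List String) then d.modify "Odds" [] (· ++ [feat])
  else if PySem.Str.isIn "season" feat || PySem.Str.isIn "allstar" feat then d.modify "Season" [] (· ++ [feat])
  else if PySem.Str.isIn "travel" feat || PySem.Str.isIn "home_season_win_pct" feat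
        || PySem.Str.isIn "away_season_win_pct" feat then d.modify "Team Context" [] (· ++ [feat])
  else d.modify "Team Stats (Rolling)" [] (· ++ [feat])

def categorize_features (feature_names : List String) : List (String × List String) :=
  (feature_names.foldl pvStep pvInitCats).items

-- ===== PORT B =====
def pyCategoryNames : List String :=
  ["Team Stats (Rolling)", "Team Context", "Differentials", "Lineup/Injury",
   "Matchup (H2H)", "Elo", "Referee", "News", "Sentiment", "Schedule", "Odds", "Season"]

def pyClassify (feat : String) : String :=
  if PySem.Str.isIn "ref_" feat then "Referee"
  else if PySem.Str.isIn "news_" feat then "News"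
  else if PySem.Str.isIn "sentiment" feat then "Sentiment"
  else if PySem.Str.isIn "lineup" feat || PySem.Str.isIn "injury" feat || PySem.Str.isIn "injured" feat
        || PySem.Str.isIn "missing" feat || PySem.Str.isIn "impact" feat then "Lineup/Injury"
  else if PySem.Str.isIn "elo" feat then "Elo"
  else if PySem.Str.startswith feat "diff_" then "Differentials"
  else if PySem.Str.isIn "h2h_" feat || PySem.Str.isIn "division" feat || PySem.Str.isIn "conference" feat
        || PySem.Str.isIn "rivalry" feat then "Matchup (H2H)"
  else if PySem.Str.isIn "b2b" feat || PySem.Str.isIn "rest" feat then "Schedule"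
  else if feat ∈ (["spread_home", "total"] : List String) then "Odds"
  else if PySem.Str.isIn "season" feat || PySem.Str.isIn "allstar" feat then "Season"
  else if PySem.Str.isIn "travel" feat || PySem.Str.isIn "home_season_win_pct" feat
        || PySem.Str.isIn "away_season_win_pct" feat then "Team Context"
  else "Team Stats (Rolling)"

def categorize_features_alt (feature_names : List String) : List (String × List String) :=
  pyCategoryNames.map (fun cat => (cat, feature_names.filter (fun f => pyClassify f == cat)))

-- ===== PRECONDITION & SPEC =====
def Spec_categorize_features (feature_names : List String) (out : List (String × List String)) : Prop := out = categorize_features_alt feature_names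
instance (feature_names : List String) (out : List (String × List String)) : Decidable (Spec_categorize_features feature_names out) := by unfold Spec_categorize_features; infer_instance

-- ===== CLAIM (what is proved, stated in full; the proofs are below) =====
def Claim_equal_categorize_features : Prop := ∀ (feature_names : List String), Dom_categorize_features feature_names → Spec_categorize_features feature_names (categorize_features feature_names)

-- ===== LEMMAS AND PROOFS =====

-- A's loop body is "append feat to the bucket pyClassify picks"
theorem pvStep_eq (d : PySem.Dict String (List String)) (feat : String) :
    pvStep d feat = d.modify (pyClassify feat) [] (· ++ [feat]) := by
  unfold pvStep pyClassify
  simp only [apply_ite (fun c => PySem.Dict.modify d c [] (· ++ [feat]))]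

theorem pyClassify_mem (feat : String) : pyClassify feat ∈ pyCategoryNames := by
  unfold pyClassify pyCategoryNames
  repeat' split
  all_goals decide

set_option maxHeartbeats 1000000 in
theorem pvInit_keys : pvInitCats.keys = pyCategoryNames := by decide

set_option maxHeartbeats 1000000 in
theorem pvInit_getD (k : String) : pvInitCats.getD k [] = [] := by
  rw [PySem.Dict.getD_eq_get?_getD]
  have : pvInitCats = PySem.Dict.mk
    [("Team Stats (Rolling)", []), ("Team Context", []), ("Differentials", []),
     ("Lineup/Injury", []), ("Matchup (H2H)", []), ("Elo", []), ("Referee", []),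
     ("News", []), ("Sentiment", []), ("Schedule", []), ("Odds", []), ("Season", [])] := by decide
  rw [this]
  simp only [PySem.Dict.get?_mk_cons]
  have h0 : (PySem.Dict.mk ([] : List (String × List String))).get? k = none := rfl
  rw [h0]
  simp only [apply_ite (fun o => Option.getD o ([] : List String)), Option.getD_some,
    Option.getD_none, ite_self]

-- ===== VERDICT (by name: the statement is the Claim_ definition above) =====
set_option maxHeartbeats 1000000 in
theorem categorize_features_spec : Claim_equal_categorize_features := by
  intro feats _
  unfold Spec_categorize_features categorize_features categorize_features_alt
  have hstep : pvStep = fun d f => PySem.Dict.modify d (pyClassify f) [] (· ++ [f]) :=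
    funext fun d => funext fun f => pvStep_eq d f
  rw [hstep]
  have hmap : feats.foldl (fun d f => PySem.Dict.modify d (pyClassify f) [] (· ++ [f])) pvInitCats
      = (feats.map (fun f => (pyClassify f, f))).foldl
          (fun d p => PySem.Dict.modify d p.1 [] (· ++ [p.2])) pvInitCats := by
    rw [List.foldl_map]
  rw [hmap]
  set l := feats.map (fun f => (pyClassify f, f)) with hl
  have hkeys : (l.foldl (fun d p => PySem.Dict.modify d p.1 [] (· ++ [p.2])) pvInitCats).keys
      = pyCategoryNames := by
    rw [PySem.Dict.keys_foldl_modify_key (key := Prod.fst), pvInit_keys]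
    rw [PySem.Set.update_eq_append_filter]
    have : ((PySem.Set.ofList (l.map Prod.fst)).filter
        (fun y => !(PySem.Set.contains pyCategoryNames y))) = [] := by
      rw [List.filter_eq_nil_iff]
      intro y hy
      have hy' : y ∈ l.map Prod.fst := (PySem.Set.mem_ofList _ _).mp hy
      simp only [hl, List.map_map, List.mem_map] at hy'
      obtain ⟨f, _, rfl⟩ := hy'
      simp [pyClassify_mem]
    rw [this, List.append_nil]
  have hnodup : (l.foldl (fun d p => PySem.Dict.modify d p.1 [] (· ++ [p.2])) pvInitCats).keys.Nodup := by
    rw [hkeys]; decide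
  rw [PySem.Dict.items_eq_map_keys _ hnodup []]
  rw [hkeys]
  apply List.map_congr_left
  intro k _
  rw [PySem.Dict.getD_foldl_modify_append, pvInit_getD]
  simp [hl, List.filter_map, Function.comp_def]
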